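-- pv_equiv track=rewrite | github.com/yasufumi-nakata/omoikane | src/omoikane/self_construction/builders.py | _normalized_git_worktree_observer_stdout
-- ===== SOURCE A (Python) =====
-- def _normalized_git_worktree_observer_stdout(stdout: str) -> str:
--     """Drop stale prunable worktree stanzas before observer digest comparison."""
--     stanzas: list[list[str]] = []
--     current: list[str] = []
--     for line in stdout.splitlines():
--         if line.startswith("worktree ") and current:
--             stanzas.append(current)
--             current = []
--         current.append(line)
--     if current:
--         stanzas.append(current)
--
--     stable_stanzas = [
--         stanza
--         for stanza in stanzas
--         if not any(line.startswith("prunable ") for line in stanza)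
--     ]
--     normalized = "\n".join("\n".join(stanza) for stanza in stable_stanzas)
--     return f"{normalized}\n" if normalized else ""
-- ===== SOURCE B (Python) =====
-- def _normalized_git_worktree_observer_stdout(stdout: str) -> str:
--     """Drop stale prunable worktree stanzas before observer digest comparison.
--
--     Single linear pass: no list of stanzas is materialized; a flat `kept`
--     list, the current stanza buffer and a `prunable` flag are maintained.
--     """
--     kept: list[str] = []
--     current: list[str] = []
--     prunable = False
--     for line in stdout.splitlines():
--         if line.startswith("worktree ") and current:
--             if not prunable:
--                 kept.extend(current)
--             current = []
--             prunable = False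
--         current.append(line)
--         if line.startswith("prunable "):
--             prunable = True
--     if current and not prunable:
--         kept.extend(current)
--     res = "\n".join(kept)
--     return res + "\n" if res else ""
-- ===== Notes on version B (the rewrite author's own statement) =====
-- stated objective: alternative
-- what changed: Replaces the two-phase design (materialize a list of stanza lists, then filter it and join joins) with one linear pass that keeps a flat list of kept lines plus a current-buffer and a prunable flag, flushing the buffer at each stanza boundary; only one join is performed at the end.
import Mathlib
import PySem

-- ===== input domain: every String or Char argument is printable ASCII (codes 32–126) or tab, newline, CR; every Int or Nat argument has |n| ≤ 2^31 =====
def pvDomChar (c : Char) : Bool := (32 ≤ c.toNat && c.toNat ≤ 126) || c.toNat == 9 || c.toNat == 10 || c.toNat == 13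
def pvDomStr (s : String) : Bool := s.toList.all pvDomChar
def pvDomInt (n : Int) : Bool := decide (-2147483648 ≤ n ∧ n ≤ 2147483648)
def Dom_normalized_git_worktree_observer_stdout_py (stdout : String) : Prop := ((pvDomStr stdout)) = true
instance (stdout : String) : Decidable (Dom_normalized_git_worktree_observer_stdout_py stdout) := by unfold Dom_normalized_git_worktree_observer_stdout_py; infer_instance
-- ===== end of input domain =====

-- B replaces A's two-phase design (build a list of stanza lists, filter it, join the
-- per-stanza joins) by a single linear pass with a flat kept-lines list, a current
-- buffer and a prunable flag (objective: alternative decomposition, same cost).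


-- ===== PORT A =====
-- loop body of A: split the lines into stanzas at lines starting with "worktree "
def pvAStep (st : List (List String) × List String) (line : String) : List (List String) × List String :=
  if PySem.Str.startswith line "worktree " && !st.2.isEmpty then
    (st.1 ++ [st.2], [] ++ [line])
  else
    (st.1, st.2 ++ [line])

def normalized_git_worktree_observer_stdout_py (stdout : String) : String :=
  let st := (PySem.Str.splitlines stdout).foldl pvAStep ([], [])
  let stanzas := if !st.2.isEmpty then st.1 ++ [st.2] else st.1
  let stable := stanzas.filter (fun stanza => !(stanza.any (fun line => PySem.Str.startswith line "prunable ")))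
  let normalized := PySem.Str.join "\n" (stable.map (fun stanza => PySem.Str.join "\n" stanza))
  if normalized ≠ "" then normalized ++ "\n" else ""

-- ===== PORT B =====
-- loop body of B: flush the non-prunable current buffer into the flat kept list at each stanza boundary
def pvBStep (st : List String × List String × Bool) (line : String) : List String × List String × Bool :=
  let st' := if PySem.Str.startswith line "worktree " && !st.2.1.isEmpty then
      ((if st.2.2 then st.1 else st.1 ++ st.2.1), ([] : List String), false)
    else st
  (st'.1, st'.2.1 ++ [line], st'.2.2 || PySem.Str.startswith line "prunable ")

def normalized_git_worktree_observer_stdout_py_alt (stdout : String) : String :=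
  let st := (PySem.Str.splitlines stdout).foldl pvBStep ([], [], false)
  let kept := if !st.2.1.isEmpty && !st.2.2 then st.1 ++ st.2.1 else st.1
  let res := PySem.Str.join "\n" kept
  if res ≠ "" then res ++ "\n" else ""

-- ===== PRECONDITION & SPEC =====
def Spec_normalized_git_worktree_observer_stdout_py (stdout : String) (out : String) : Prop := out = normalized_git_worktree_observer_stdout_py_alt stdout
instance (stdout : String) (out : String) : Decidable (Spec_normalized_git_worktree_observer_stdout_py stdout out) := by unfold Spec_normalized_git_worktree_observer_stdout_py; infer_instance

-- ===== CLAIM (what is proved, stated in full; the proofs are below) =====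
def Claim_equal_normalized_git_worktree_observer_stdout_py : Prop := ∀ (stdout : String), Dom_normalized_git_worktree_observer_stdout_py stdout → Spec_normalized_git_worktree_observer_stdout_py stdout (normalized_git_worktree_observer_stdout_py stdout)

-- ===== LEMMAS AND PROOFS =====

-- abbreviations used only by the proofs
def pvPr (line : String) : Bool := PySem.Str.startswith line "prunable "
def pvStable (stanza : List String) : Bool := !(stanza.any pvPr)

theorem pv_chars_join_append (sep x : List Char) (a b : List (List Char)) (hb : b ≠ []) :
    PySem.Chars.join sep ((x :: a) ++ b) = PySem.Chars.join sep (x :: a) ++ sep ++ PySem.Chars.join sep b := by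
  induction a generalizing x with
  | nil =>
    obtain ⟨y, ys, rfl⟩ := List.exists_cons_of_ne_nil hb
    simp [PySem.Chars.join_cons_cons, PySem.Chars.join_singleton]
  | cons z a' ih =>
    simp only [List.cons_append, PySem.Chars.join_cons_cons]
    rw [show z :: (a' ++ b) = (z :: a') ++ b from rfl, ih z]
    simp [List.append_assoc]

theorem pv_chars_join_flatten (sep : List Char) (st : List (List (List Char)))
    (h : ∀ s ∈ st, s ≠ []) :
    PySem.Chars.join sep (st.map (PySem.Chars.join sep)) = PySem.Chars.join sep st.flatten := by
  induction st with
  | nil => rfl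
  | cons s rest ih =>
    cases rest with
    | nil => simp [PySem.Chars.join_singleton]
    | cons s' rest' =>
      have hs : s ≠ [] := h s (by simp)
      have hs' : s' ≠ [] := h s' (by simp)
      have hfl : (s' :: rest').flatten ≠ [] := by
        obtain ⟨c, cs, rfl⟩ := List.exists_cons_of_ne_nil hs'
        simp
      obtain ⟨c, cs, rfl⟩ := List.exists_cons_of_ne_nil hs
      rw [List.map_cons, List.map_cons, PySem.Chars.join_cons_cons,
          ← List.map_cons, ih (fun t ht => h t (by simp [ht]))]
      rw [show ((c :: cs) :: s' :: rest').flatten = (c :: cs) ++ (s' :: rest').flatten from rfl,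
          pv_chars_join_append sep c cs _ hfl]

-- joining the per-stanza joins equals joining the flattened lines, for nonempty stanzas
theorem pv_join_flatten (stanzas : List (List String)) (h : ∀ s ∈ stanzas, s ≠ []) :
    PySem.Str.join "\n" (stanzas.map (fun stanza => PySem.Str.join "\n" stanza))
      = PySem.Str.join "\n" stanzas.flatten := by
  simp only [PySem.Str.join]
  congr 1
  rw [List.map_map]
  have h1 : stanzas.map (String.toList ∘ fun stanza => String.ofList (PySem.Chars.join "\n".toList (stanza.map String.toList)))
      = (stanzas.map (List.map String.toList)).map (PySem.Chars.join "\n".toList) := by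
    rw [List.map_map]
    apply List.map_congr_left
    intro s _
    simp
  rw [h1, pv_chars_join_flatten _ _
        (by intro s hs
            obtain ⟨t, ht, rfl⟩ := List.mem_map.mp hs
            simpa using h t ht),
      ← List.map_flatten]

-- loop invariant: B's fold state mirrors A's (kept = flattened stable stanzas so far,
-- same current buffer, flag = current has a prunable line), and A's stanzas stay nonempty
theorem pv_inv (lines : List String) (stanzas : List (List String)) (current : List String)
    (h : ∀ s ∈ stanzas, s ≠ []) :
    lines.foldl pvBStep (((stanzas.filter pvStable).flatten, current, current.any pvPr))
      = (((lines.foldl pvAStep (stanzas, current)).1.filter pvStable).flatten,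
         (lines.foldl pvAStep (stanzas, current)).2,
         (lines.foldl pvAStep (stanzas, current)).2.any pvPr)
    ∧ ∀ s ∈ (lines.foldl pvAStep (stanzas, current)).1, s ≠ [] := by
  induction lines generalizing stanzas current with
  | nil => exact ⟨rfl, h⟩
  | cons line rest ih =>
    simp only [List.foldl_cons]
    by_cases hg : (PySem.Str.startswith line "worktree " && !current.isEmpty) = true
    · have hcur : current ≠ [] := by
        rcases current with _ | _
        · simp at hg
        · simp
      have hA : pvAStep (stanzas, current) line = (stanzas ++ [current], [line]) := by
        simp only [pvAStep]; rw [if_pos hg]; rfl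
      have hB : pvBStep ((stanzas.filter pvStable).flatten, current, current.any pvPr) line
          = (((stanzas ++ [current]).filter pvStable).flatten, [line], [line].any pvPr) := by
        simp only [pvBStep]
        rw [if_pos hg]
        by_cases hp : current.any pvPr = true
        · rw [if_pos hp]
          simp [List.filter_append, pvStable, hp, pvPr]
        · rw [if_neg hp]
          simp [List.filter_append, pvStable, Bool.eq_false_iff.mpr hp, pvPr]
      rw [hA, hB]
      exact ih (stanzas ++ [current]) [line]
        (by intro s hs
            rcases List.mem_append.mp hs with h1 | h1
            · exact h s h1
            · simp at h1; subst h1; exact hcur)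
    · have hA : pvAStep (stanzas, current) line = (stanzas, current ++ [line]) := by
        simp only [pvAStep]; rw [if_neg hg]
      have hB : pvBStep ((stanzas.filter pvStable).flatten, current, current.any pvPr) line
          = ((stanzas.filter pvStable).flatten, current ++ [line], (current ++ [line]).any pvPr) := by
        simp only [pvBStep]
        rw [if_neg hg]
        simp [pvPr]
      rw [hA, hB]
      exact ih stanzas (current ++ [line]) h

theorem pv_main_eq (stdout : String) :
    normalized_git_worktree_observer_stdout_py stdout = normalized_git_worktree_observer_stdout_py_alt stdout := by
  unfold normalized_git_worktree_observer_stdout_py normalized_git_worktree_observer_stdout_py_alt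
  obtain ⟨hB, hne⟩ := pv_inv (PySem.Str.splitlines stdout) [] [] (by intro s hs; simp at hs)
  have hB' : (PySem.Str.splitlines stdout).foldl pvBStep ([], [], false)
      = ((((PySem.Str.splitlines stdout).foldl pvAStep ([], [])).1.filter pvStable).flatten,
         ((PySem.Str.splitlines stdout).foldl pvAStep ([], [])).2,
         ((PySem.Str.splitlines stdout).foldl pvAStep ([], [])).2.any pvPr) := hB
  rw [hB']
  set stA := (PySem.Str.splitlines stdout).foldl pvAStep ([], []) with hstA
  have hfil : ∀ s ∈ stA.1.filter pvStable, s ≠ ([] : List String) :=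
    fun s hs => hne s (List.mem_of_mem_filter hs)
  have hPs : (fun stanza => !stanza.any fun line => PySem.Str.startswith line "prunable ") = pvStable := rfl
  dsimp only
  rw [hPs]
  rcases hcur : stA.2 with _ | ⟨x, xs⟩
  · simp only [List.isEmpty_nil, Bool.not_true, Bool.false_and, if_false, Bool.false_eq_true]
    rw [pv_join_flatten _ hfil]
  · by_cases hp : (x :: xs).any pvPr = true
    · have h1 : List.filter pvStable [x :: xs] = [] := by simp [pvStable, hp]
      simp only [List.isEmpty_cons, Bool.not_false, Bool.true_and, hp, Bool.not_true,
        Bool.false_eq_true, if_true, if_false, List.filter_append, h1, List.append_nil]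
      rw [pv_join_flatten _ hfil]
    · have hp' : (x :: xs).any pvPr = false := Bool.eq_false_iff.mpr hp
      have h1 : List.filter pvStable [x :: xs] = [x :: xs] := by simp [pvStable, hp']
      have h2 : ∀ s ∈ List.filter pvStable stA.1 ++ [x :: xs], s ≠ ([] : List String) := by
        intro s hs
        rcases List.mem_append.mp hs with h3 | h3
        · exact hfil s h3
        · simp at h3; subst h3; simp
      simp only [List.isEmpty_cons, Bool.not_false, Bool.true_and, hp',
        if_true, List.filter_append, h1]
      rw [pv_join_flatten _ h2, List.flatten_append]
      simp

-- ===== VERDICT (by name: the statement is the Claim_ definition above) =====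
theorem normalized_git_worktree_observer_stdout_py_spec : Claim_equal_normalized_git_worktree_observer_stdout_py := by
  intro stdout _
  unfold Spec_normalized_git_worktree_observer_stdout_py
  exact pv_main_eq stdout
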